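-- pv_equiv track=rewrite | github.com/mitch-parker/rascore | src/rascore/util/scripts/cluster_matrix.py | connect_graph
-- ===== SOURCE A (Python) =====
-- def connect_graph(graph_dict, node_lst, result_dict):
--
--     for node in node_lst:
--
--         subgraph = set(
--             [k for k, v in list(graph_dict.items()) if graph_dict[node].intersection(v)]
--         )
--
--         if subgraph:
--
--             node_lst = [x for x in node_lst if x not in list(subgraph)]
--             node_lst = node_lst
--             result_dict[node] = subgraph
--
--             result_dict = connect_graph(graph_dict, node_lst, result_dict)
--
--         else:
--             continue
--
--         if len(node_lst) == 1 or len(node_lst) == 0: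
--             return result_dict
--         break
--
--     return result_dict
-- ===== SOURCE B (Python) =====
-- def connect_graph(graph_dict, node_lst, result_dict):
--     removed = set()
--     for node in node_lst:
--         if node in removed:
--             continue
--         subgraph = {k for k, v in graph_dict.items() if graph_dict[node].intersection(v)}
--         if subgraph:
--             result_dict[node] = subgraph
--             removed.update(subgraph)
--     return result_dict
-- ===== Notes on version B (the rewrite author's own statement) =====
-- stated objective: alternative
-- what changed: A's tail recursion, which after each found subgraph rebuilds a filtered node list and rescans it from the start, is replaced by a single pass over the original node_lst that skips nodes already absorbed into an earlier subgraph via a 'removed' set.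
import Mathlib
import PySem

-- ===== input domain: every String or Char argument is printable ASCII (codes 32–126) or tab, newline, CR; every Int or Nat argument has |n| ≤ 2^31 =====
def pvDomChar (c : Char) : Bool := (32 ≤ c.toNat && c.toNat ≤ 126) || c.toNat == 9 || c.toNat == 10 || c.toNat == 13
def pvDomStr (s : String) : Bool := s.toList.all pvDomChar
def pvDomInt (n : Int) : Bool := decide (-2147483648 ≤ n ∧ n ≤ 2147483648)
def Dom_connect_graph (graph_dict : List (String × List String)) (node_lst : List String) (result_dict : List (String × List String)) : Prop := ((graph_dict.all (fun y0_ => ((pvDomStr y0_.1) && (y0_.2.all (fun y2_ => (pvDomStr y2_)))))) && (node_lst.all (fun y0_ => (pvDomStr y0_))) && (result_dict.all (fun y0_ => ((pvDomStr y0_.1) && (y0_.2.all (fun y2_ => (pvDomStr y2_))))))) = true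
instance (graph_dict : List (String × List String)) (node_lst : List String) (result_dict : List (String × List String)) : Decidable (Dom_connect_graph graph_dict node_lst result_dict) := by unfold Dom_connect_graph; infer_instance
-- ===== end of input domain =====

-- B replaces A's rescan-and-refilter tail recursion by one single pass over node_lst with a
-- `removed` set (same return value; A mutates result_dict in place, B performs the same mutation).

-- ===== PORT A =====
-- shared helpers for expressions that occur verbatim in both Python sources:
-- first-match dict lookup graph_dict[node] (Pre_ guarantees the key exists),
-- set.intersection truthiness, the subgraph set-comprehension, and result_dict[k] = v.
def pvLookup (g : List (String × List String)) (k : String) : List String :=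
  match g with
  | [] => []
  | (a, v) :: t => if a == k then v else pvLookup t k

def pvInter (a b : List String) : List String := a.filter (fun x => b.contains x)

def pvSubgraph (g : List (String × List String)) (node : String) : List String :=
  PySem.Set.ofList ((g.filter (fun kv => !(pvInter (pvLookup g node) kv.2).isEmpty)).map Prod.fst)

def pvDictSet (d : List (String × List String)) (k : String) (v : List String) : List (String × List String) :=
  if d.any (fun kv => kv.1 == k) then d.map (fun kv => if kv.1 == k then (kv.1, v) else kv)
  else d ++ [(k, v)]

-- A's `for node in node_lst` up to the first node with a nonempty subgraph
def cgScan (g : List (String × List String)) : List String → Option (String × List String)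
  | [] => none
  | node :: rest =>
    let sub := pvSubgraph g node
    if sub.isEmpty then cgScan g rest else some (node, sub)

theorem pvLookup_mem (g : List (String × List String)) (k : String) (h : pvLookup g k ≠ []) :
    (k, pvLookup g k) ∈ g := by
  induction g with
  | nil => simp [pvLookup] at h
  | cons kv t ih =>
    by_cases hk : kv.1 == k
    · have : pvLookup (kv :: t) k = kv.2 := by cases kv; simp_all [pvLookup]
      rw [this]
      have : kv = (k, kv.2) := by cases kv; simp_all
      exact this ▸ List.mem_cons_self
    · have he : pvLookup (kv :: t) k = pvLookup t k := by cases kv; simp_all [pvLookup]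
      rw [he]; exact List.mem_cons_of_mem _ (ih (he ▸ h))

theorem mem_pvSubgraph_self (g : List (String × List String)) (node : String)
    (h : pvSubgraph g node ≠ []) : node ∈ pvSubgraph g node := by
  have hval : pvLookup g node ≠ [] := by
    intro hval
    apply h
    simp only [pvSubgraph, hval]
    have : (g.filter (fun kv => !(pvInter [] kv.2).isEmpty)) = [] := by
      simp [pvInter]
    simp [this, PySem.Set.ofList]
  rw [pvSubgraph, PySem.Set.mem_ofList, List.mem_map]
  refine ⟨(node, pvLookup g node), List.mem_filter.mpr ⟨pvLookup_mem g node hval, ?_⟩, rfl⟩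
  have heq : pvInter (pvLookup g node) (pvLookup g node) = pvLookup g node := by
    rw [pvInter]; exact List.filter_eq_self.mpr (fun a ha => by simpa using ha)
  simp [heq, hval]

theorem cgScan_some {g : List (String × List String)} {nl : List String} {node : String}
    {sub : List String} (h : cgScan g nl = some (node, sub)) :
    node ∈ nl ∧ node ∈ sub ∧ sub = pvSubgraph g node := by
  induction nl with
  | nil => simp [cgScan] at h
  | cons x rest ih =>
    simp only [cgScan] at h
    by_cases he : (pvSubgraph g x).isEmpty
    · simp only [he, if_pos] at h
      obtain ⟨h1, h2, h3⟩ := ih h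
      exact ⟨List.mem_cons_of_mem _ h1, h2, h3⟩
    · rw [if_neg he] at h
      injection h with h; injection h with h1 h2; subst h1; subst h2
      refine ⟨List.mem_cons_self, ?_, rfl⟩
      exact mem_pvSubgraph_self g x (by simpa [List.isEmpty_iff] using he)

theorem cgScan_filter_lt {g : List (String × List String)} {nl : List String} {node : String}
    {sub : List String} (h : cgScan g nl = some (node, sub)) :
    (nl.filter (fun x => !sub.contains x)).length < nl.length := by
  obtain ⟨h1, h2, _⟩ := cgScan_some h
  apply List.length_filter_lt_length_iff_exists.mpr
  exact ⟨node, h1, by simp [h2]⟩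

-- A's recursion: find the first node with a nonempty subgraph, record it, filter node_lst, recurse.
def cgAux (g : List (String × List String)) (nl : List String) (rd : List (String × List String)) :
    List (String × List String) :=
  match h : cgScan g nl with
  | none => rd
  | some (node, sub) =>
      cgAux g (nl.filter (fun x => !sub.contains x)) (pvDictSet rd node sub)
termination_by nl.length
decreasing_by
  simp only [List.unattach_filter, List.unattach_attach]
  exact cgScan_filter_lt h

def connect_graph (graph_dict : List (String × List String)) (node_lst : List String) (result_dict : List (String × List String)) : List (String × List String) :=
  cgAux graph_dict node_lst result_dict

-- ===== PORT B =====
-- one pass over node_lst, skipping nodes already absorbed into an earlier subgraph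
def cgLoop (g : List (String × List String)) :
    List String → PySem.Set String → List (String × List String) → List (String × List String)
  | [], _, rd => rd
  | node :: rest, removed, rd =>
    if removed.contains node then cgLoop g rest removed rd
    else
      let sub := pvSubgraph g node
      if sub.isEmpty then cgLoop g rest removed rd
      else cgLoop g rest (PySem.Set.update removed sub) (pvDictSet rd node sub)

def connect_graph_alt (graph_dict : List (String × List String)) (node_lst : List String) (result_dict : List (String × List String)) : List (String × List String) :=
  cgLoop graph_dict node_lst PySem.Set.empty result_dict

-- ===== PRECONDITION & SPEC =====
-- Pre_ excludes exactly the inputs where Python A raises KeyError: a node of node_lst that is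
-- not a key of a NONEMPTY graph_dict (with an empty graph_dict the comprehension never
-- evaluates graph_dict[node], so A returns normally).
def Pre_connect_graph (graph_dict : List (String × List String)) (node_lst : List String) (result_dict : List (String × List String)) : Prop :=
  graph_dict = [] ∨ ∀ x ∈ node_lst, x ∈ graph_dict.map Prod.fst
instance (graph_dict : List (String × List String)) (node_lst : List String) (result_dict : List (String × List String)) : Decidable (Pre_connect_graph graph_dict node_lst result_dict) := by unfold Pre_connect_graph; infer_instance

def pvWitness_connect_graph : (List (String × List String)) × List String × (List (String × List String)) :=
  ([("a", ["x"]), ("b", ["x", "y"]), ("c", [])], ["a", "c", "b"], [])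

def Spec_connect_graph (graph_dict : List (String × List String)) (node_lst : List String) (result_dict : List (String × List String)) (out : List (String × List String)) : Prop := out = connect_graph_alt graph_dict node_lst result_dict
instance (graph_dict : List (String × List String)) (node_lst : List String) (result_dict : List (String × List String)) (out : List (String × List String)) : Decidable (Spec_connect_graph graph_dict node_lst result_dict out) := by unfold Spec_connect_graph; infer_instance

-- ===== CLAIM (what is proved, stated in full; the proofs are below) =====
def Claim_equal_connect_graph : Prop := ∀ (graph_dict : List (String × List String)) (node_lst : List String) (result_dict : List (String × List String)), Dom_connect_graph graph_dict node_lst result_dict → Pre_connect_graph graph_dict node_lst result_dict → Spec_connect_graph graph_dict node_lst result_dict (connect_graph graph_dict node_lst result_dict)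

-- ===== LEMMAS AND PROOFS =====

theorem cgAux_none {g : List (String × List String)} {nl : List String}
    {rd : List (String × List String)} (h : cgScan g nl = none) : cgAux g nl rd = rd := by
  rw [cgAux.eq_def]; split <;> simp_all

theorem cgAux_some {g : List (String × List String)} {nl : List String} {node : String}
    {sub : List String} {rd : List (String × List String)} (h : cgScan g nl = some (node, sub)) :
    cgAux g nl rd = cgAux g (nl.filter (fun x => !sub.contains x)) (pvDictSet rd node sub) := by
  conv_lhs => rw [cgAux.eq_def]
  split
  · simp_all
  · next n s heq => rw [h] at heq; injection heq with heq; injection heq with h1 h2; subst h1; subst h2; simp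

-- scanning skips a prefix of nodes whose subgraph is empty
theorem cgScan_append_of_empty {g : List (String × List String)} {pre : List String}
    (L : List String) (hp : ∀ x ∈ pre, pvSubgraph g x = []) :
    cgScan g (pre ++ L) = cgScan g L := by
  induction pre with
  | nil => rfl
  | cons x t ih =>
    have hx : (pvSubgraph g x).isEmpty = true := by
      rw [List.isEmpty_iff]; exact hp x List.mem_cons_self
    simp only [List.cons_append, cgScan, hx, if_pos]
    exact ih (fun y hy => hp y (List.mem_cons_of_mem _ hy))

-- a prefix of empty-subgraph nodes never affects A's result
theorem cgAux_append_of_empty (g : List (String × List String)) :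
    ∀ (n : Nat) (L : List String), L.length ≤ n →
    ∀ (pre : List String) (rd : List (String × List String)),
      (∀ x ∈ pre, pvSubgraph g x = []) → cgAux g (pre ++ L) rd = cgAux g L rd := by
  intro n
  induction n with
  | zero =>
    intro L hL pre rd hp
    have : L = [] := List.length_eq_zero_iff.mp (Nat.le_zero.mp hL)
    subst this
    rw [cgAux_none (by simpa using cgScan_append_of_empty [] hp), cgAux_none rfl]
  | succ n ih =>
    intro L hL pre rd hp
    cases h : cgScan g L with
    | none =>
      rw [cgAux_none (by rw [cgScan_append_of_empty L hp]; exact h), cgAux_none h]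
    | some p =>
      obtain ⟨node, sub⟩ := p
      have hpre : cgScan g (pre ++ L) = some (node, sub) := by
        rw [cgScan_append_of_empty L hp]; exact h
      rw [cgAux_some hpre, cgAux_some h, List.filter_append]
      have hlt := cgScan_filter_lt h
      exact ih _ (by omega) _ _ (fun x hx => hp x (List.mem_of_mem_filter hx))

-- main invariant: A running on node_lst minus the removed set = B continuing with that removed set
theorem cgAux_eq_cgLoop (g : List (String × List String)) :
    ∀ (nl : List String) (removed : PySem.Set String) (rd : List (String × List String)),
      cgAux g (nl.filter (fun x => !removed.contains x)) rd = cgLoop g nl removed rd := by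
  intro nl
  induction nl with
  | nil => intro removed rd; exact cgAux_none rfl
  | cons node rest ih =>
    intro removed rd
    by_cases hr : removed.contains node
    · simp only [List.filter_cons, hr, Bool.not_true, if_neg, Bool.false_eq_true, not_false_iff,
        cgLoop, if_pos]
      exact ih removed rd
    · have hrf : removed.contains node = false := by simpa using hr
      simp only [List.filter_cons, hrf, Bool.not_false, if_pos, cgLoop, Bool.false_eq_true,
        if_neg, not_false_iff]
      by_cases he : (pvSubgraph g node).isEmpty
      · simp only [he, if_pos]
        have : (node :: rest.filter (fun x => !removed.contains x)) =
            [node] ++ rest.filter (fun x => !removed.contains x) := rfl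
        rw [this, cgAux_append_of_empty g _ _ (Nat.le_refl _) _ _
          (by intro x hx; rw [List.mem_singleton] at hx; subst hx;
              exact List.isEmpty_iff.mp he)]
        exact ih removed rd
      · simp only [he, Bool.false_eq_true, if_neg, not_false_iff]
        have hscan : cgScan g (node :: rest.filter (fun x => !removed.contains x)) =
            some (node, pvSubgraph g node) := by
          simp only [cgScan, he, Bool.false_eq_true, if_neg, not_false_iff]
        rw [cgAux_some hscan]
        have hmem : node ∈ pvSubgraph g node :=
          mem_pvSubgraph_self g node (by simpa [List.isEmpty_iff] using he)
        have hfilter : ((node :: rest.filter (fun x => !removed.contains x)).filter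
              (fun x => !(pvSubgraph g node).contains x)) =
            rest.filter (fun x => !(PySem.Set.update removed (pvSubgraph g node)).contains x) := by
          have hnode : (pvSubgraph g node).contains node = true := by
            simpa using hmem
          simp only [List.filter_cons, hnode, Bool.not_true, if_neg, Bool.false_eq_true,
            not_false_iff, List.filter_filter]
          apply List.filter_congr
          intro x _
          have : (PySem.Set.update removed (pvSubgraph g node)).contains x =
              (removed.contains x || (pvSubgraph g node).contains x) := by
            by_cases h1 : x ∈ removed <;> by_cases h2 : x ∈ pvSubgraph g node <;>
              simp [PySem.Set.mem_update, h1, h2]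
          rw [this]
          cases removed.contains x <;> cases (pvSubgraph g node).contains x <;> simp
        rw [hfilter]
        exact ih (PySem.Set.update removed (pvSubgraph g node)) (pvDictSet rd node (pvSubgraph g node))

-- ===== VERDICT (by name: the statement is the Claim_ definition above) =====
theorem connect_graph_spec : Claim_equal_connect_graph := by
  intro graph_dict node_lst result_dict _ _
  unfold Spec_connect_graph connect_graph connect_graph_alt
  rw [← cgAux_eq_cgLoop]
  congr 1
  simp [PySem.Set.empty]
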